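-- pv_equiv track=rewrite | github.com/olcf/harmony | scripts/notifications/slack_app/slack_commands.py | make_columns
-- ===== SOURCE A (Python) =====
-- def make_columns(tuple_list, col_sizes=[10, 20, 20]):
--     """
--     Make formatted columns from a list of tuples. Column size is enlarged if the input columns are
--     too small to correctly format the data.
--
--     :param tuple_list: A list of tuples to turn into columns.
--     :param col_sizes: Size of columns to make.
--     :return: Formatted columns.
--     """
--
--     # Initialize an empty sting.
--     string = ""
--     # Make sure the list is not empty.
--     if len(tuple_list) == 0:
--         return string
--     # Check that there are the correct number of columns to values.
--     if len(tuple_list[0]) != len(col_sizes):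
--         raise ValueError("Invalid column sizes. Cannot understand " + str(len(col_sizes)) +
--                          " defining " + str(len(tuple_list[0])) + " columns.")
--
--     # Change list of tuples into list of tuples only containing strings.
--     tuple_list = [tuple([str(val) for val in tup]) for tup in tuple_list]
--
--     # Get new column sizes for columns that were not wide enough when set.
--     col_sizes = maximize_col_sizes(tuple_list, col_sizes)
--
--     # For each tuple, format it and put it into the string.
--     for i in range(len(tuple_list)):
--         tup = tuple_list[i]
--
--         # Create the unformatted string containing which value and column width.
--         unformatted = ""
--         for j in range(len(tup)):
--             unformatted += "{" + str(j) + ":<" + str(col_sizes[j]) + "} "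
--
--         # Unpack the tuple with '*' operator and format it.
--         string += unformatted.format(*tup)
--         # If there will be another line, add an end line.
--         if i < len(tuple_list) - 1:
--             string += "\n"
--
--     # Return the fully formatted string.
--     return string
--
-- def maximize_col_sizes(tuple_list, col_sizes):
--     """
--     Take a list of tuples containing strings and column widths and make sure each string can fit in the column width.
--     If not then enlarge the column.
--
--     :param tuple_list: List of tuples containing strings.
--     :param col_sizes: List of sizes for each column.
--     :return: The correctly sized columns.
--     """
--
--     # Create list to hold new columns.
--     new_cols = [0] * len(col_sizes)
--     # Iterate over columns.
--     for i in range(len(col_sizes)):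
--         # Get the maximum sized element in that column in the list of tuples.
--         max_col_size = max((len(tup[i]) for tup in tuple_list))
--         # Get the larger of the two, whether that be the input column size or the max elements size.
--         new_cols[i] = max(max_col_size, col_sizes[i])
--     # Return the new column sizes.
--     return new_cols
-- ===== SOURCE B (Python) =====
-- def make_columns(tuple_list, col_sizes=[10, 20, 20]):
--     """Column-major rewrite: build each column as a fully padded block of
--     cells, then stitch the blocks together row by row."""
--     if not tuple_list:
--         return ""
--     if len(tuple_list[0]) != len(col_sizes):
--         raise ValueError("Invalid column sizes. Cannot understand " + str(len(col_sizes)) +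
--                          " defining " + str(len(tuple_list[0])) + " columns.")
--     blocks = []
--     for i, size in enumerate(col_sizes):
--         cells = [str(tup[i]) for tup in tuple_list]
--         width = max(max(len(c) for c in cells), size)
--         blocks.append([c.ljust(width) + " " for c in cells])
--     return "\n".join("".join(block[r] for block in blocks)
--                      for r in range(len(tuple_list)))
-- ===== Notes on version B (the rewrite author's own statement) =====
-- stated objective: alternative
-- what changed: Replaces A's row-major pass (separate maximize_col_sizes width helper, then a per-row built format string) with a column-major construction: each column is turned into one fully padded block of cells (width computed inside the same column pass), and the blocks are stitched together row by row at the end.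
import Mathlib
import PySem

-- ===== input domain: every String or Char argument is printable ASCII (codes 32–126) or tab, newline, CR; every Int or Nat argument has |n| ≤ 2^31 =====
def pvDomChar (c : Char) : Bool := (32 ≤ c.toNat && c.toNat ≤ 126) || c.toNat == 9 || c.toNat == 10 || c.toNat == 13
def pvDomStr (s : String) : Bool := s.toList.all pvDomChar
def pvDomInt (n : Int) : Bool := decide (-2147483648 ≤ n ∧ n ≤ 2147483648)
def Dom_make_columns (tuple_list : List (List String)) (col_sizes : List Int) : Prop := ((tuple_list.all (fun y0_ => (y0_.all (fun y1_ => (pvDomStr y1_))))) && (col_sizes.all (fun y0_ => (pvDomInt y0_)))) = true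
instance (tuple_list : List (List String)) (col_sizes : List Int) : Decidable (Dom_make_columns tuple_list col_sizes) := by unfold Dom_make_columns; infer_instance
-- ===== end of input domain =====

-- B builds the table column-major: each column becomes a fully padded block of cells, and the
-- blocks are stitched together row by row; A formats row-major with a built format string.

-- left-justify: s padded with spaces to width w (Python "{:<w}" / str.ljust; exact, w may be negative)
def pvLjust (s : List Char) (w : Int) : List Char :=
  s ++ List.replicate (w - (s.length : Int)).toNat ' '

-- ===== PORT A =====
-- strings are modelled as List Char throughout; the port wraps String.mk at the end
def maximize_col_sizes (tuple_list : List (List (List Char))) (col_sizes : List Int) : List Int :=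
  (List.range col_sizes.length).foldl
    (fun new_cols i =>
      let max_col_size : Int :=
        ((tuple_list.map (fun tup => ((tup.getD i []).length : Int))).max?).getD 0
      new_cols.set i (max max_col_size (col_sizes.getD i 0)))
    (List.replicate col_sizes.length 0)

-- "unformatted += "{j:<w} "; unformatted.format(*tup)" is ported exactly as
-- appending ljust-to-w of tup[j] plus one space per j (exact for this format spec).
def make_columns (tuple_list : List (List String)) (col_sizes : List Int) : String :=
  if tuple_list.length = 0 then ""
  else if (tuple_list.getD 0 []).length ≠ col_sizes.length then ""  -- Python raises ValueError here (outside Pre_)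
  else
    let tl := tuple_list.map (fun tup => tup.map String.toList)  -- str(val) on a str is the identity
    let cs := maximize_col_sizes tl col_sizes
    String.mk <|
      (List.range tl.length).foldl
        (fun s i =>
          let tup := tl.getD i []
          let line := (List.range tup.length).foldl
            (fun u j => u ++ pvLjust (tup.getD j []) (cs.getD j 0) ++ [' ']) []
          let s := s ++ line
          if (i : Int) < (tl.length : Int) - 1 then s ++ ['\n'] else s)
        []

-- ===== PORT B =====
def make_columns_alt (tuple_list : List (List String)) (col_sizes : List Int) : String :=
  if tuple_list = [] then ""
  else if (tuple_list.headD []).length ≠ col_sizes.length then ""  -- same ValueError (outside Pre_)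
  else
    let blocks := (PySem.List.enumerate col_sizes).map (fun p =>
      let cells := tuple_list.map (fun tup => (tup.getD p.1.toNat "").toList)
      let width := max (((cells.map (fun c => (c.length : Int))).max?).getD 0) p.2
      cells.map (fun c => pvLjust c width ++ [' ']))
    String.mk <|
      List.intercalate ['\n']
        ((List.range tuple_list.length).map (fun r =>
          (blocks.map (fun b => b.getD r [])).flatten))

-- ===== PRECONDITION & SPEC =====
-- Pre_ excludes inputs where A raises: a first row whose length differs from col_sizes (ValueError),
-- or any other row whose length differs from it (IndexError).
def Pre_make_columns (tuple_list : List (List String)) (col_sizes : List Int) : Prop :=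
  ∀ row ∈ tuple_list, row.length = col_sizes.length

instance (tuple_list : List (List String)) (col_sizes : List Int) : Decidable (Pre_make_columns tuple_list col_sizes) := by
  unfold Pre_make_columns; infer_instance

def pvWitness_make_columns : List (List String) × List Int :=
  ([["ab", "c"], ["d", "eee"]], [1, 4])

def Spec_make_columns (tuple_list : List (List String)) (col_sizes : List Int) (out : String) : Prop := out = make_columns_alt tuple_list col_sizes
instance (tuple_list : List (List String)) (col_sizes : List Int) (out : String) : Decidable (Spec_make_columns tuple_list col_sizes out) := by unfold Spec_make_columns; infer_instance

-- ===== CLAIM (what is proved, stated in full; the proofs are below) =====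
def Claim_equal_make_columns : Prop := ∀ (tuple_list : List (List String)) (col_sizes : List Int), Dom_make_columns tuple_list col_sizes → Pre_make_columns tuple_list col_sizes → Spec_make_columns tuple_list col_sizes (make_columns tuple_list col_sizes)

-- ===== LEMMAS AND PROOFS =====

-- A's new_cols loop (set index i for every i < n) builds the pointwise map.
theorem pv_setfold (n : ℕ) (f : ℕ → Int) (acc : List Int) (h : n ≤ acc.length) :
    (List.range n).foldl (fun l i => l.set i (f i)) acc
      = (List.range n).map f ++ acc.drop n := by
  induction n with
  | zero => simp
  | succ m ih =>
    rw [List.range_succ, List.foldl_append, List.map_append]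
    rw [ih (by omega)]
    have hm : m < acc.length := by omega
    rw [List.drop_eq_getElem_cons hm]
    have hl : ((List.range m).map f).length = m := by simp
    simp only [List.foldl_cons, List.foldl_nil, List.set_append, hl]
    simp
    rw [List.drop_eq_getElem_cons hm, List.set_cons_zero]

-- accumulate-by-append fold is flatten of the map
theorem pv_foldl_append {α β : Type} (xs : List α) (g : α → List β) (init : List β) :
    xs.foldl (fun u x => u ++ g x) init = init ++ (xs.map g).flatten := by
  induction xs generalizing init with
  | nil => simp
  | cons a t ih => simp [ih]

theorem pv_intercalate_cons (sep a b : List Char) (t : List (List Char)) :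
    List.intercalate sep (a :: b :: t) = a ++ sep ++ List.intercalate sep (b :: t) := by
  simp [List.intercalate]

-- join-with-separator: A's "append '\n' except after the last line" equals intercalate
theorem pv_intercalate (ls : List (List Char)) (h : ls ≠ []) :
    ((List.range ls.length).map (fun (i : ℕ) =>
        if (i : Int) < (ls.length : Int) - 1 then ls.getD i [] ++ ['\n'] else ls.getD i [])).flatten
      = List.intercalate ['\n'] ls := by
  induction ls with
  | nil => simp at h
  | cons l t ih =>
    cases t with
    | nil => simp [List.intercalate]
    | cons b t' =>
      have hne : (b :: t') ≠ [] := by simp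
      rw [show (l :: b :: t').length = (b :: t').length + 1 from rfl,
          List.range_succ_eq_map]
      rw [List.map_cons, List.map_map, List.flatten_cons]
      have hcond : ((0 : ℕ) : Int) < (((b :: t').length + 1 : ℕ) : Int) - 1 := by
        push_cast [List.length_cons]; omega
      rw [if_pos hcond]
      have hmaps : (List.range (b :: t').length).map
          ((fun (i : ℕ) => if (i : Int) < (((b :: t').length + 1 : ℕ) : Int) - 1
              then (l :: b :: t').getD i [] ++ ['\n'] else (l :: b :: t').getD i []) ∘ Nat.succ)
          = (List.range (b :: t').length).map (fun (i : ℕ) =>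
              if (i : Int) < ((b :: t').length : Int) - 1
              then (b :: t').getD i [] ++ ['\n'] else (b :: t').getD i []) := by
        apply List.map_congr_left
        intro i hi
        have hi' : i < (b :: t').length := List.mem_range.mp hi
        have : ((Nat.succ i : ℕ) : Int) < (((b :: t').length + 1 : ℕ) : Int) - 1
            ↔ ((i : ℕ) : Int) < ((b :: t').length : Int) - 1 := by push_cast; omega
        simp only [Function.comp]
        rw [show (l :: b :: t').getD (Nat.succ i) [] = (b :: t').getD i [] from rfl]
        by_cases hc : ((i : ℕ) : Int) < ((b :: t').length : Int) - 1
        · rw [if_pos (this.mpr hc), if_pos hc]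
        · rw [if_neg (fun hx => hc (this.mp hx)), if_neg hc]
      rw [hmaps, ih hne]
      rw [pv_intercalate_cons]
      simp [List.getD]

-- maximize_col_sizes in closed (range-map) form
theorem pv_maximize_eq (tl : List (List (List Char))) (cs : List Int) :
    maximize_col_sizes tl cs = (List.range cs.length).map (fun i =>
      max (((tl.map (fun tup => ((tup.getD i []).length : Int))).max?).getD 0) (cs.getD i 0)) := by
  unfold maximize_col_sizes
  rw [pv_setfold _ _ _ (by simp)]
  simp

-- A's outer loop re-shaped: accumulate-by-append with the trailing-newline choice folded into each piece
theorem pv_outer (N : ℕ) (g : ℕ → List Char) :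
    (List.range N).foldl
        (fun (s : List Char) (i : ℕ) => if (i : Int) < (N : Int) - 1 then (s ++ g i) ++ ['\n'] else s ++ g i) []
      = ((List.range N).map (fun (i : ℕ) => if (i : Int) < (N : Int) - 1 then g i ++ ['\n'] else g i)).flatten := by
  have hb : (fun (s : List Char) (i : ℕ) => if (i : Int) < (N : Int) - 1 then (s ++ g i) ++ ['\n'] else s ++ g i)
      = fun (s : List Char) (i : ℕ) => s ++ (if (i : Int) < (N : Int) - 1 then g i ++ ['\n'] else g i) := by
    funext s i
    by_cases hc : (i : Int) < (N : Int) - 1 <;> simp [hc]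
  rw [hb, pv_foldl_append, List.nil_append]

-- the canonical line r, with widths W (one padded-cell piece per column index)
def pvCanonLine (tl : List (List (List Char))) (W : List Int) (k : ℕ) (r : ℕ) : List Char :=
  ((List.range k).map (fun j => pvLjust ((tl.getD r []).getD j []) (W.getD j 0) ++ [' '])).flatten

-- A's char-level computation equals the canonical form
theorem pv_A_canon (tuple_list : List (List String)) (cs : List Int)
    (hne : tuple_list ≠ [])
    (hpre : ∀ row ∈ tuple_list, row.length = cs.length) :
    (List.range (tuple_list.map (fun tup => tup.map String.toList)).length).foldl
        (fun s i =>
          let tup := (tuple_list.map (fun tup => tup.map String.toList)).getD i []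
          let line := (List.range tup.length).foldl
            (fun u j => u ++ pvLjust (tup.getD j [])
              ((maximize_col_sizes (tuple_list.map (fun tup => tup.map String.toList)) cs).getD j 0) ++ [' ']) []
          let s := s ++ line
          if (i : Int) < ((tuple_list.map (fun tup => tup.map String.toList)).length : Int) - 1
            then s ++ ['\n'] else s) []
      = List.intercalate ['\n']
          ((List.range tuple_list.length).map
            (pvCanonLine (tuple_list.map (fun tup => tup.map String.toList))
              (maximize_col_sizes (tuple_list.map (fun tup => tup.map String.toList)) cs) cs.length)) := by
  set tl := tuple_list.map (fun tup => tup.map String.toList) with htl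
  set W := maximize_col_sizes tl cs with hW
  have hlen : ∀ row ∈ tl, row.length = cs.length := by
    intro row hrow
    rw [htl] at hrow
    simp only [List.mem_map] at hrow
    obtain ⟨tup, htup, rfl⟩ := hrow
    simp [hpre tup htup]
  have hN : tl.length = tuple_list.length := by simp [htl]
  -- inner foldl of row i = pvCanonLine
  have hline : ∀ i ∈ List.range tl.length,
      (List.range ((tl.getD i []).length)).foldl
        (fun u j => u ++ pvLjust ((tl.getD i []).getD j []) (W.getD j 0) ++ [' ']) []
      = pvCanonLine tl W cs.length i := by
    intro i hi
    have hiN : i < tl.length := List.mem_range.mp hi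
    have hrl : (tl.getD i []).length = cs.length := by
      apply hlen
      rw [List.getD_eq_getElem?_getD, List.getElem?_eq_getElem hiN]
      exact List.getElem_mem hiN
    have hb : (fun (u : List Char) j => u ++ pvLjust ((tl.getD i []).getD j []) (W.getD j 0) ++ [' '])
        = fun u j => u ++ (pvLjust ((tl.getD i []).getD j []) (W.getD j 0) ++ [' ']) := by
      funext u j; simp
    rw [hb, pv_foldl_append, List.nil_append, hrl]
    rfl
  -- reshape the outer loop
  rw [pv_outer tl.length (fun i =>
    (List.range ((tl.getD i []).length)).foldl
      (fun u j => u ++ pvLjust ((tl.getD i []).getD j []) (W.getD j 0) ++ [' ']) [])]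
  set ls := (List.range tuple_list.length).map (pvCanonLine tl W cs.length) with hls
  have hlsne : ls ≠ [] := by
    rw [hls]
    cases tuple_list with
    | nil => exact absurd rfl hne
    | cons a t => simp [List.range_succ_eq_map]
  rw [← pv_intercalate ls hlsne]
  have hlslen : ls.length = tl.length := by simp [hls, hN]
  rw [hlslen]
  congr 1
  apply List.map_congr_left
  intro i hi
  have hiN : i < tl.length := List.mem_range.mp hi
  have hgd : ls.getD i [] = pvCanonLine tl W cs.length i := by
    rw [hls, List.getD_eq_getElem?_getD, List.getElem?_map,
        List.getElem?_eq_getElem (by rw [List.length_range, ← hN]; exact hiN)]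
    simp
  rw [hline i hi, hgd]

-- B's blocks, read out at row r, give the canonical line
theorem pv_B_blocks (tuple_list : List (List String)) (cs : List Int) (r : ℕ)
    (hr : r < tuple_list.length) :
    ((PySem.List.enumerate cs).map (fun p =>
        let cells := tuple_list.map (fun tup => (tup.getD p.1.toNat "").toList)
        let width := max (((cells.map (fun c => (c.length : Int))).max?).getD 0) p.2
        cells.map (fun c => pvLjust c width ++ [' ']))).map (fun b => b.getD r [])
      = (List.range cs.length).map (fun j =>
          pvLjust (((tuple_list.map (fun tup => tup.map String.toList)).getD r []).getD j [])
            ((maximize_col_sizes (tuple_list.map (fun tup => tup.map String.toList)) cs).getD j 0) ++ [' ']) := by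
  set tl := tuple_list.map (fun tup => tup.map String.toList) with htl
  rw [pv_maximize_eq]
  apply List.ext_getElem
  · simp [PySem.List.length_enumerate]
  intro i h1 h2
  have hics : i < cs.length := by simpa using h2
  simp only [List.getElem_map, PySem.List.getElem_enumerate, List.getElem_range]
  have hidx : ((0 : Int) + (i : Int)).toNat = i := by omega
  -- cells at index i
  have hcells : tuple_list.map (fun tup => (tup.getD ((0 : Int) + (i : Int)).toNat "").toList)
      = tl.map (fun tup => tup.getD i []) := by
    rw [hidx, htl, List.map_map]
    apply List.map_congr_left
    intro tup _
    simp only [Function.comp, List.getD_eq_getElem?_getD, List.getElem?_map]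
    cases tup[i]? <;> simp
  simp only [hcells]
  -- read the padded-cells block at row r
  have hrlen : r < (tl.map (fun tup => tup.getD i [])).length := by simpa [htl] using hr
  rw [List.getD_eq_getElem?_getD,
      List.getElem?_eq_getElem (by simpa using hrlen), List.getElem_map, List.getElem_map]
  simp only [Option.getD_some]
  -- widths: maximize in closed form at index i
  have hWget : ∀ (f : ℕ → Int), ((List.range cs.length).map f).getD i 0 = f i := by
    intro f
    rw [List.getD_eq_getElem?_getD, List.getElem?_map,
        List.getElem?_eq_getElem (by simpa using hics)]
    simp
  rw [hWget]
  -- cell: (tl.getD r []).getD i []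
  have htlr : tl.getD r [] = tl[r]'(by simpa [htl] using hr) := by
    rw [List.getD_eq_getElem?_getD, List.getElem?_eq_getElem (by simpa [htl] using hr)]
    rfl
  have hcs : cs.getD i 0 = cs[i] := by
    rw [List.getD_eq_getElem?_getD, List.getElem?_eq_getElem hics]
    rfl
  rw [← htlr, List.map_map, hcs]
  rfl

-- ===== VERDICT (by name: the statement is the Claim_ definition above) =====
theorem make_columns_spec : Claim_equal_make_columns := by
  intro tuple_list col_sizes _ hpre
  unfold Spec_make_columns
  cases htl : tuple_list with
  | nil => rfl
  | cons a t =>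
    subst htl
    have hr : a.length = col_sizes.length := hpre a (by simp)
    unfold make_columns make_columns_alt
    rw [if_neg (by simp), if_neg (by simp [hr]), if_neg (by simp), if_neg (by simp [hr])]
    refine congrArg String.mk ?_
    rw [pv_A_canon (a :: t) col_sizes (by simp) hpre]
    congr 1
    apply List.map_congr_left
    intro r hrr
    have hrN : r < (a :: t).length := List.mem_range.mp hrr
    rw [pv_B_blocks (a :: t) col_sizes r hrN]
    rfl
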